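-- pv_equiv track=rewrite | github.com/DerekEarnhart/SafeUSI | attached_assets/true_wsm_intelligence_1759254814720.py | _extract_food_item
-- ===== SOURCE A (Python) =====
-- def _extract_food_item(text: str) -> str:
--     """Extract food item from text"""
--     food_words = ['pizza', 'burger', 'sandwich', 'salad', 'pasta', 'sushi', 'tacos', 'soup', 'steak', 'chicken', 'fish', 'rice', 'bread', 'cake', 'ice cream', 'coffee', 'tea']
--     words = text.lower().split()
--
--     for word in words:
--         if word in food_words:
--             return word
--
--     # Look for "had X" or "ate X" patterns
--     for i, word in enumerate(words):
--         if word in ['had', 'ate', 'ordered', 'tried'] and i + 1 < len(words):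
--             return words[i + 1]
--
--     return "food"
-- ===== SOURCE B (Python) =====
-- def _extract_food_item(text: str) -> str:
--     """Extract food item from text"""
--     food_words = {'pizza', 'burger', 'sandwich', 'salad', 'pasta', 'sushi', 'tacos', 'soup', 'steak', 'chicken', 'fish', 'rice', 'bread', 'cake', 'ice cream', 'coffee', 'tea'}
--     verbs = {'had', 'ate', 'ordered', 'tried'}
--     words = text.lower().split()
--     fallback = None
--     for i, word in enumerate(words):
--         if word in food_words:
--             return word
--         if fallback is None and word in verbs and i + 1 < len(words):
--             fallback = words[i + 1]
--     return fallback if fallback is not None else "food"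
-- ===== Notes on version B (the rewrite author's own statement) =====
-- stated objective: alternative
-- what changed: A's two sequential scans (first for a food word, then an enumerate scan for a verb pattern) are merged into one single pass that returns a food word immediately and records the word after the first qualifying verb in a held-over fallback used only if no food word appears.
import Mathlib
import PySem

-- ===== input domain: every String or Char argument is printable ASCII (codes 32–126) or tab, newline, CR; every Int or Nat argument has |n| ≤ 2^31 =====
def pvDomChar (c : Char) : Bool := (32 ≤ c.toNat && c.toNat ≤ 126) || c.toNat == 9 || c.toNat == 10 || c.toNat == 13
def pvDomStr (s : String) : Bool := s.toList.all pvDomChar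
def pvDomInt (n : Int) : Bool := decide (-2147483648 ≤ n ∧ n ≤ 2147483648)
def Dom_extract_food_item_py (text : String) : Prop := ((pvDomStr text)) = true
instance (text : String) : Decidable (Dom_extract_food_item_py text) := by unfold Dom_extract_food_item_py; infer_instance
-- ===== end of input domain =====

-- B merges A's two scans into one pass with a held-over fallback (objective: alternative decomposition, same cost).

-- ===== PORT A =====
def pvFoods : List String :=
  ["pizza", "burger", "sandwich", "salad", "pasta", "sushi", "tacos", "soup",
   "steak", "chicken", "fish", "rice", "bread", "cake", "ice cream", "coffee", "tea"]

def pvVerbs : List String := ["had", "ate", "ordered", "tried"]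

-- first loop of A: return the first food word
def aFoodLoop : List String → Option String
  | [] => none
  | w :: rest => if w ∈ pvFoods then some w else aFoodLoop rest

-- second loop of A: 'for i, word in enumerate(words): if word in verbs and i+1 < len(words): return words[i+1]'
def aVerbLoop (words : List String) : List (Int × String) → String
  | [] => "food"
  | (i, w) :: rest =>
      if w ∈ pvVerbs ∧ i + 1 < (words.length : Int) then
        (PySem.List.pyGet? words (i + 1)).getD "food"
      else aVerbLoop words rest

def extract_food_item_py (text : String) : String :=
  let words := PySem.Str.split₀ (PySem.Str.lower text)
  match aFoodLoop words with
  | some w => w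
  | none => aVerbLoop words (PySem.List.enumerate words 0)

-- ===== PORT B =====
-- single pass with a held-over fallback; 'i + 1 < len(words)' ↔ the tail is nonempty and words[i+1] is its head
def bLoop : List String → Option String → String
  | [], fb => fb.getD "food"
  | w :: rest, fb =>
      if w ∈ pvFoods then w
      else bLoop rest (if fb = none ∧ w ∈ pvVerbs ∧ rest ≠ [] then some (rest.headD "") else fb)

def extract_food_item_py_alt (text : String) : String :=
  bLoop (PySem.Str.split₀ (PySem.Str.lower text)) none

-- ===== PRECONDITION & SPEC =====
def Spec_extract_food_item_py (text : String) (out : String) : Prop := out = extract_food_item_py_alt text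
instance (text : String) (out : String) : Decidable (Spec_extract_food_item_py text out) := by unfold Spec_extract_food_item_py; infer_instance

-- ===== CLAIM (what is proved, stated in full; the proofs are below) =====
def Claim_equal_extract_food_item_py : Prop := ∀ (text : String), Dom_extract_food_item_py text → Spec_extract_food_item_py text (extract_food_item_py text)

-- ===== LEMMAS AND PROOFS =====

-- simple characterization of A's second loop: the word after the first verb with a successor
def afterVerb : List String → Option String
  | [] => none
  | w :: rest => if w ∈ pvVerbs ∧ rest ≠ [] then some (rest.headD "") else afterVerb rest

theorem aVerbLoop_eq (suf : List String) : ∀ (pre : List String),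
    aVerbLoop (pre ++ suf) (PySem.List.enumerate suf (pre.length : Int)) =
      (afterVerb suf).getD "food" := by
  induction suf with
  | nil => intro pre; simp [aVerbLoop, afterVerb, PySem.List.enumerate]
  | cons w rest ih =>
    intro pre
    rw [PySem.List.enumerate_cons]
    show aVerbLoop (pre ++ w :: rest) (((pre.length : Int), w) :: _) = _
    by_cases hv : w ∈ pvVerbs
    · cases rest with
      | nil =>
        have hc : ¬ (w ∈ pvVerbs ∧ (pre.length : Int) + 1 < ((pre ++ [w]).length : Int)) := by
          simp
        rw [aVerbLoop, if_neg hc]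
        have := ih (pre ++ [w])
        simp only [List.append_assoc, List.singleton_append, List.length_append,
          List.length_singleton] at this ⊢
        rw [show ((pre.length : Int) + 1) = ((pre.length + 1 : Nat) : Int) by push_cast; ring]
        rw [this]
        simp [afterVerb, hv]
      | cons n rest' =>
        have hc : w ∈ pvVerbs ∧ (pre.length : Int) + 1 < ((pre ++ w :: n :: rest').length : Int) := by
          constructor
          · exact hv
          · simp
        rw [aVerbLoop, if_pos hc]
        have hg : PySem.List.pyGet? (pre ++ w :: n :: rest') ((pre.length : Int) + 1) = some n := by
          have := PySem.List.pyGet?_append_length (pre := pre ++ [w]) (y := n) (ys := rest')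
          simp only [List.append_assoc, List.singleton_append, List.length_append,
            List.length_singleton] at this
          rw [show ((pre.length : Int) + 1) = (((pre ++ [w]).length : Nat) : Int) by
            simp]
          simpa using PySem.List.pyGet?_append_length (pre := pre ++ [w]) (y := n) (ys := rest')
        rw [hg]
        simp [afterVerb, hv]
    · have hc : ¬ (w ∈ pvVerbs ∧ (pre.length : Int) + 1 < ((pre ++ w :: rest).length : Int)) := by
        intro h; exact hv h.1
      rw [aVerbLoop, if_neg hc]
      have := ih (pre ++ [w])
      simp only [List.append_assoc, List.singleton_append, List.length_append,
        List.length_singleton] at this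
      rw [show ((pre.length : Int) + 1) = ((pre.length + 1 : Nat) : Int) by push_cast; ring]
      rw [this]
      simp [afterVerb, hv]

theorem bLoop_eq (ws : List String) : ∀ (fb : Option String),
    bLoop ws fb =
      match aFoodLoop ws with
      | some w => w
      | none => ((fb.orElse fun _ => afterVerb ws).getD "food") := by
  induction ws with
  | nil => intro fb; cases fb <;> simp [bLoop, aFoodLoop, afterVerb]
  | cons w rest ih =>
    intro fb
    by_cases hf : w ∈ pvFoods
    · simp [bLoop, aFoodLoop, hf]
    · rw [bLoop, if_neg hf, ih]
      have hA : aFoodLoop (w :: rest) = aFoodLoop rest := by rw [aFoodLoop, if_neg hf]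
      rw [hA]
      cases h : aFoodLoop rest with
      | some u => rfl
      | none =>
        cases fb with
        | some v => simp
        | none =>
          by_cases hv : w ∈ pvVerbs ∧ rest ≠ []
          · simp [hv, afterVerb]
          · simp only [afterVerb, if_neg hv]
            simp [hv]

-- ===== VERDICT (by name: the statement is the Claim_ definition above) =====
theorem extract_food_item_py_spec : Claim_equal_extract_food_item_py := by
  intro text _
  unfold Spec_extract_food_item_py extract_food_item_py extract_food_item_py_alt
  set ws := PySem.Str.split₀ (PySem.Str.lower text) with hws
  rw [bLoop_eq ws none]
  have h2 := aVerbLoop_eq ws []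
  simp only [List.nil_append, List.length_nil, Nat.cast_zero] at h2
  cases h : aFoodLoop ws with
  | some u => simp [h]
  | none => simp [h, h2]
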